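-- pv_equiv track=rewrite | github.com/D4NIL122IQ/automate-ThL | aibjSansRe.py | pasDeMelange
-- ===== SOURCE A (Python) =====
-- def pasDeMelange(mot ):
--     debutB = mot.find("b");
--     finB = mot.rfind("b")
--     sousMot =mot[debutB:finB]
--     for cara in sousMot:
--         if not cara =="b":
--             return False;
--     return True;
-- ===== SOURCE B (Python) =====
-- def pasDeMelange(mot):
--     # single left-to-right pass: state 0 = before any 'b', 1 = inside the
--     # run of 'b', 2 = after the run; a 'b' seen in state 2 means mixing.
--     state = 0
--     for cara in mot:
--         if cara == "b":
--             if state == 2: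
--                 return False
--             state = 1
--         elif state == 1:
--             state = 2
--     return True
-- ===== Notes on version B (the rewrite author's own statement) =====
-- stated objective: alternative
-- what changed: Replaces find/rfind plus a scan of the slice between them with a single one-pass three-state machine that rejects a 'b' appearing after the first maximal run of 'b's ended.
import Mathlib
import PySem

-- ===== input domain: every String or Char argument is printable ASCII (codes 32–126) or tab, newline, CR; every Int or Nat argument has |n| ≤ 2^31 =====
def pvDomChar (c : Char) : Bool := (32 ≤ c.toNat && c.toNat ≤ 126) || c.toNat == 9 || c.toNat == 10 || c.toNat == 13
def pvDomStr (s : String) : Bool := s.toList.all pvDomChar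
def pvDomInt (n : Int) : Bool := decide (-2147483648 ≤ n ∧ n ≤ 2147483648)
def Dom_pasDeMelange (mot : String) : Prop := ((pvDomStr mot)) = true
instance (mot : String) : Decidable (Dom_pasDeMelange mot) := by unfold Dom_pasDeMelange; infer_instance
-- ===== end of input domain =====

-- B replaces A's find/rfind + scan of the slice between them by a single
-- one-pass three-state machine (alternative decomposition, same cost).

-- ===== PORT A =====
-- the `for cara in sousMot: if not cara == "b": return False` loop
def scanLoopA : List Char → Bool
  | [] => true
  | cara :: rest => if !(cara = 'b' : Bool) then false else scanLoopA rest

def pasDeMelange (mot : String) : Bool :=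
  let debutB := PySem.Str.find mot "b"
  let finB := PySem.Str.rfind mot "b"
  let sousMot := PySem.Str.slice mot (some debutB) (some finB)
  scanLoopA sousMot.toList

-- ===== PORT B =====
-- the state-machine loop of Source B: state 0 before any 'b', 1 inside the run, 2 after it
def altGo : List Char → Nat → Bool
  | [], _ => true
  | cara :: rest, state =>
    if cara = 'b' then
      if state = 2 then false else altGo rest 1
    else if state = 1 then altGo rest 2
    else altGo rest state

def pasDeMelange_alt (mot : String) : Bool := altGo mot.toList 0

-- ===== PRECONDITION & SPEC =====
def Spec_pasDeMelange (mot : String) (out : Bool) : Prop := out = pasDeMelange_alt mot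
instance (mot : String) (out : Bool) : Decidable (Spec_pasDeMelange mot out) := by unfold Spec_pasDeMelange; infer_instance

-- ===== CLAIM (what is proved, stated in full; the proofs are below) =====
def Claim_equal_pasDeMelange : Prop := ∀ (mot : String), Dom_pasDeMelange mot → Spec_pasDeMelange mot (pasDeMelange mot)

-- ===== LEMMAS AND PROOFS =====

-- split a list at the FIRST occurrence of 'b'
theorem first_split {l : List Char} (h : 'b' ∈ l) :
    ∃ p q, l = p ++ 'b' :: q ∧ 'b' ∉ p := by
  induction l with
  | nil => cases h
  | cons c t ih =>
    by_cases hc : c = 'b'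
    · exact ⟨[], t, by simp [hc], by simp⟩
    · have ht : 'b' ∈ t := by
        cases h with
        | head => exact absurd rfl hc
        | tail _ h => exact h
      obtain ⟨p, q, rfl, hp⟩ := ih ht
      exact ⟨c :: p, q, rfl, by simp [hp]; exact fun h => hc h.symm⟩

-- split a list at the LAST occurrence of 'b'
theorem last_split {l : List Char} (h : 'b' ∈ l) :
    ∃ m s, l = m ++ 'b' :: s ∧ 'b' ∉ s := by
  induction l with
  | nil => cases h
  | cons c t ih =>
    by_cases ht : 'b' ∈ t
    · obtain ⟨m, s, rfl, hs⟩ := ih ht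
      exact ⟨c :: m, s, rfl, hs⟩
    · have hc : c = 'b' := by
        cases h with
        | head => rfl
        | tail _ h => exact absurd h ht
      exact ⟨[], t, by simp [hc], ht⟩

theorem altGo_no_b {l : List Char} (h : 'b' ∉ l) (st : Nat) : altGo l st = true := by
  induction l generalizing st with
  | nil => rfl
  | cons c t ih =>
    have hc : ¬ c = 'b' := fun hc => h (hc ▸ List.mem_cons_self)
    have ht : 'b' ∉ t := fun ht => h (List.mem_cons_of_mem _ ht)
    simp only [altGo, if_neg hc]
    split_ifs <;> exact ih ht _

theorem altGo_two_mem {l : List Char} (h : 'b' ∈ l) : altGo l 2 = false := by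
  induction l with
  | nil => cases h
  | cons c t ih =>
    by_cases hc : c = 'b'
    · simp [altGo, hc]
    · have ht : 'b' ∈ t := by
        cases h with
        | head => exact absurd rfl hc
        | tail _ h => exact h
      simp [altGo, hc, ih ht]

theorem altGo_zero_append {p x : List Char} (hp : 'b' ∉ p) :
    altGo (p ++ x) 0 = altGo x 0 := by
  induction p with
  | nil => rfl
  | cons c t ih =>
    have hc : ¬ c = 'b' := fun hc => hp (hc ▸ List.mem_cons_self)
    have ht : 'b' ∉ t := fun h => hp (List.mem_cons_of_mem _ h)
    simp [altGo, hc, ih ht]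

theorem altGo_one_split {m s : List Char} (hs : 'b' ∉ s) :
    altGo (m ++ 'b' :: s) 1 = scanLoopA m := by
  induction m with
  | nil => simp [altGo, scanLoopA, altGo_no_b hs]
  | cons c t ih =>
    by_cases hc : c = 'b'
    · simp [altGo, scanLoopA, hc, ih]
    · have : 'b' ∈ t ++ 'b' :: s := by simp
      simp [altGo, scanLoopA, hc, altGo_two_mem this]

-- ['b'] is a prefix only of lists headed by 'b'
theorem prefix_b_head {t : List Char} (h : ['b'] <+: t) : ∃ r, t = 'b' :: r := by
  obtain ⟨r, hr⟩ := h
  exact ⟨r, hr.symm⟩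

theorem isPrefixOf_b_mem {t : List Char} (h : List.isPrefixOf ['b'] t = true) : 'b' ∈ t := by
  obtain ⟨r, hr⟩ := prefix_b_head (List.isPrefixOf_iff_prefix.1 h)
  rw [hr]
  exact List.mem_cons_self

theorem find_first {p q : List Char} (hp : 'b' ∉ p) :
    PySem.Chars.find (p ++ 'b' :: q) ['b'] = (p.length : Int) := by
  set l := p ++ 'b' :: q with hl
  have hinf : ['b'] <:+: l := ⟨p, q, by simp [hl]⟩
  have h0 : 0 ≤ PySem.Chars.find l ['b'] := (PySem.Chars.find_nonneg_iff _ _).2 hinf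
  obtain ⟨hpre, hmin⟩ := PySem.Chars.find_spec (s := l) (sub := ['b']) h0
  set n := (PySem.Chars.find l ['b']).toNat with hn
  have hdropp : l.drop p.length = 'b' :: q := by simp [hl]
  have hle : n ≤ p.length := by
    by_contra hlt
    exact hmin p.length (by omega) (hdropp ▸ ⟨q, rfl⟩)
  have hge : p.length ≤ n := by
    by_contra hlt
    push Not at hlt
    obtain ⟨r, hr⟩ := prefix_b_head hpre
    have hdrop : l.drop n = p.drop n ++ 'b' :: q := by
      simp [hl, List.drop_append_of_le_length (Nat.le_of_lt hlt)]
    cases hpd : p.drop n with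
    | nil =>
      have := congrArg List.length hpd
      simp at this
      omega
    | cons c r' =>
      have h2 : ('b' :: r : List Char) = c :: (r' ++ 'b' :: q) := by
        rw [← hr, hdrop, hpd]; simp
      have hc : c = 'b' := ((List.cons_eq_cons).1 h2).1.symm
      have hmem : 'b' ∈ p.drop n := by
        rw [hpd, hc]; exact List.mem_cons_self
      exact hp (List.mem_of_mem_drop hmem)
  have := Int.toNat_of_nonneg h0
  omega

theorem rfind_go_last {a s : List Char} (hs : 'b' ∉ s) :
    ∀ j, a.length ≤ j → PySem.Chars.rfind.go (a ++ 'b' :: s) ['b'] j = (a.length : Int) := by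
  intro j
  induction j with
  | zero =>
    intro hj
    have ha : a = [] := List.eq_nil_of_length_eq_zero (Nat.le_zero.1 hj)
    subst ha
    simp [PySem.Chars.rfind.go, List.isPrefixOf]
  | succ j ih =>
    intro hj
    rcases Nat.lt_or_ge j.succ a.length.succ with hlt | hge
    · -- a.length = j+1
      have heq : a.length = j + 1 := by omega
      have hdrop : (a ++ 'b' :: s).drop (j + 1) = 'b' :: s := by
        rw [← heq]; simp
      simp [PySem.Chars.rfind.go, hdrop, List.isPrefixOf, heq]
    · -- a.length ≤ j, so j+1 points past the last 'b'
      have hdropmem : 'b' ∉ (a ++ 'b' :: s).drop (j + 1) := by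
        intro hmem
        have hdrop : (a ++ 'b' :: s).drop (j + 1) = s.drop (j + 1 - (a.length + 1)) := by
          have h2 : j + 1 = (a ++ ['b']).length + (j + 1 - (a.length + 1)) := by
            simp; omega
          calc (a ++ 'b' :: s).drop (j + 1)
              = ((a ++ ['b']) ++ s).drop ((a ++ ['b']).length + (j + 1 - (a.length + 1))) := by
                rw [← h2]; simp
            _ = s.drop (j + 1 - (a.length + 1)) := List.drop_length_add_append _
        rw [hdrop] at hmem
        exact hs (List.mem_of_mem_drop hmem)
      have hnp : List.isPrefixOf ['b'] ((a ++ 'b' :: s).drop (j + 1)) = false := by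
        by_contra h
        exact hdropmem (isPrefixOf_b_mem (by simpa using h))
      simp [PySem.Chars.rfind.go, hnp, ih (by omega)]

theorem rfind_last {a s : List Char} (hs : 'b' ∉ s) :
    PySem.Chars.rfind (a ++ 'b' :: s) ['b'] = (a.length : Int) := by
  unfold PySem.Chars.rfind
  exact rfind_go_last hs _ (by simp)

theorem rfind_none {l : List Char} (h : 'b' ∉ l) :
    PySem.Chars.rfind l ['b'] = -1 := by
  unfold PySem.Chars.rfind
  suffices hgo : ∀ j, PySem.Chars.rfind.go l ['b'] j = -1 from hgo _
  intro j
  induction j with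
  | zero =>
    have : List.isPrefixOf ['b'] l = false := by
      by_contra hc
      exact h (isPrefixOf_b_mem (by simpa using hc))
    simp [PySem.Chars.rfind.go, this]
  | succ j ih =>
    have : List.isPrefixOf ['b'] (l.drop (j+1)) = false := by
      by_contra hc
      exact h (List.mem_of_mem_drop (isPrefixOf_b_mem (by simpa using hc)))
    simp [PySem.Chars.rfind.go, this, ih]

theorem find_none {l : List Char} (h : 'b' ∉ l) :
    PySem.Chars.find l ['b'] = -1 := by
  apply (PySem.Chars.find_eq_neg_one_iff _ _).2
  intro hinf
  obtain ⟨u, v, huv⟩ := hinf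
  exact h (huv ▸ (by simp))

theorem slice_neg_one_neg_one (l : List Char) :
    PySem.List.slice l (some (-1)) (some (-1)) = ([] : List Char) := by
  simp [PySem.List.slice]

-- the core equivalence, over the character list
theorem core (l : List Char) :
    scanLoopA (PySem.List.slice l (some (PySem.Chars.find l ['b']))
      (some (PySem.Chars.rfind l ['b']))) = altGo l 0 := by
  by_cases hb : 'b' ∈ l
  · obtain ⟨p, q, rfl, hp⟩ := first_split hb
    by_cases hq : 'b' ∈ q
    · obtain ⟨m, s, rfl, hs⟩ := last_split hq
      have hf := find_first (q := m ++ 'b' :: s) hp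
      have hr : PySem.Chars.rfind (p ++ 'b' :: (m ++ 'b' :: s)) ['b']
          = ((p ++ 'b' :: m).length : Int) := by
        have := rfind_last (a := p ++ 'b' :: m) (s := s) hs
        simpa using this
      rw [hf, hr]
      have hslice : PySem.List.slice (p ++ 'b' :: (m ++ 'b' :: s))
          (some (p.length : Int)) (some ((p ++ 'b' :: m).length : Int)) = 'b' :: m := by
        rw [PySem.List.slice_natCast]
        have h1 : (p ++ 'b' :: (m ++ 'b' :: s)).drop p.length = 'b' :: (m ++ 'b' :: s) := by
          simp
        rw [h1]
        have h2 : (p ++ 'b' :: m).length - p.length = m.length + 1 := by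
          simp
        rw [h2]
        simp [List.take_append_of_le_length (Nat.le_refl m.length)]
      rw [hslice]
      have hB : altGo (p ++ 'b' :: (m ++ 'b' :: s)) 0 = altGo (m ++ 'b' :: s) 1 := by
        rw [altGo_zero_append hp]; simp [altGo]
      rw [hB, altGo_one_split hs]
      simp [scanLoopA]
    · have hf := find_first (q := q) hp
      have hr := rfind_last (a := p) (s := q) hq
      rw [hf, hr]
      have hslice : PySem.List.slice (p ++ 'b' :: q)
          (some (p.length : Int)) (some (p.length : Int)) = ([] : List Char) := by
        rw [PySem.List.slice_natCast]; simp
      rw [hslice]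
      have hB : altGo (p ++ 'b' :: q) 0 = altGo q 1 := by
        rw [altGo_zero_append hp]; simp [altGo]
      rw [hB, altGo_no_b hq 1]
      rfl
  · rw [find_none hb, rfind_none hb, slice_neg_one_neg_one, altGo_no_b hb 0]
    rfl

-- ===== VERDICT (by name: the statement is the Claim_ definition above) =====
theorem pasDeMelange_spec : Claim_equal_pasDeMelange := by
  intro mot _
  unfold Spec_pasDeMelange pasDeMelange pasDeMelange_alt
  have hb : ("b" : String).toList = ['b'] := rfl
  simp only [PySem.Str.find, PySem.Str.rfind, PySem.Str.slice, PySem.Chars.slice, hb]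
  rw [show (String.ofList (PySem.List.slice mot.toList (some (PySem.Chars.find mot.toList ['b'])) (some (PySem.Chars.rfind mot.toList ['b'])))).toList = PySem.List.slice mot.toList (some (PySem.Chars.find mot.toList ['b'])) (some (PySem.Chars.rfind mot.toList ['b'])) from by simp]
  exact core mot.toList
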